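-- pv_equiv track=rewrite | github.com/rdkit/mmpdb | mmpdblib/environment.py | compute_possible_smarts_environments
-- ===== SOURCE A (Python) =====
-- _invert_order_table = {
--     None: None,
--     "1": None,
--     "12": None,
--     "21": (1, 0),
--     "123": None,
--     "132": (0, 2, 1),
--     "213": (1, 0, 2),
--     "231": (2, 0, 1),
--     "312": (1, 2, 0),
--     "321": (2, 1, 0),
-- }
--
-- def _make_smarts(*center_smarts_list):
--     N = len(center_smarts_list)
--     if N == 1:
--         return center_smarts_list[0]
--
--     if N == 2:
--         A, B = center_smarts_list
--         A = A.replace(":2", ":1")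
--         B = B.replace(":1", ":2")
--         return A + "." + B
--
--     if N == 3:
--         A, B, C = center_smarts_list
--         A = A.replace(":2", ":1").replace(":3", ":1")
--         B = B.replace(":1", ":2").replace(":3", ":2")
--         C = C.replace(":1", ":3").replace(":2", ":3")
--         return A + "." + B + "." + C
--
--     raise AssertionError(("too many terms", center_smarts_list))
--
-- def compute_possible_smarts_environments(center_smarts_list, symmetry_class, reorder=None):
--     # This is complex.
--     # The center_fps are based on the constant/context fragments, which have the
--     # attachment orders of 1, 2, 3.
--
--     # The attachment orders of the core SMILES is arbitrary. Not only
--     # might the (semi-)canonical SMILES be  [*:2]C([*:3])N[*:1],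
--     # but the attachments might be reorderd into one of the n! forms,
--     # like [*:1]C([*:3])N[*:2] or [*:2]C([*:1])N[*:3]. I need to
--     # unorder the permtuations to work with the 'true' numbering.
--
--     # One I have that, I need to find all the ways to match the
--     # core attachents the context. Consider:
--     #   [*:2]CN([*:3])N[*:1]
--     # This has a symmetry class of "122" because the *:1 is in its
--     # own symmetry group and the *:2 and *:3 are in the same group.
--     # (The symmetry group labels are in attachment number order, not
--     # position in the SMILES.)
--
--     # If this is attached to "[:*1]N.[:*2]N.[:*3]P" then there's
--     # some ambiguity. The environment context should be the same
--     # as if it were attached to "[:*1]N.[:*2]P.[:*3]N", because the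
--     # :*2 and *:3 are symmetric.
--
--     # This means I can have to enumerate all of the possiblities, to
--     # find all of the possible environments.
--
--     invert_order = _invert_order_table[reorder]
--     if invert_order is not None:
--         center_smarts_list = [center_smarts_list[i] for i in invert_order]
--
--     smarts_list = set()
--     if symmetry_class in ("1", "12", "123"):
--         smarts_list.add(_make_smarts(*center_smarts_list))
--     elif symmetry_class == "11":
--         smarts_list.add(_make_smarts(center_smarts_list[0], center_smarts_list[1]))
--         smarts_list.add(_make_smarts(center_smarts_list[1], center_smarts_list[0]))
--
--     elif symmetry_class == "111":
--         smarts_list.add(_make_smarts(center_smarts_list[0], center_smarts_list[1], center_smarts_list[2]))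
--         smarts_list.add(_make_smarts(center_smarts_list[0], center_smarts_list[2], center_smarts_list[1]))
--         smarts_list.add(_make_smarts(center_smarts_list[1], center_smarts_list[0], center_smarts_list[2]))
--         smarts_list.add(_make_smarts(center_smarts_list[1], center_smarts_list[2], center_smarts_list[0]))
--         smarts_list.add(_make_smarts(center_smarts_list[2], center_smarts_list[0], center_smarts_list[1]))
--         smarts_list.add(_make_smarts(center_smarts_list[2], center_smarts_list[1], center_smarts_list[0]))
--
--     elif symmetry_class == "112":
--         smarts_list.add(_make_smarts(center_smarts_list[0], center_smarts_list[1], center_smarts_list[2]))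
--         smarts_list.add(_make_smarts(center_smarts_list[1], center_smarts_list[0], center_smarts_list[2]))
--
--     elif symmetry_class == "122":
--         smarts_list.add(_make_smarts(center_smarts_list[0], center_smarts_list[1], center_smarts_list[2]))
--         smarts_list.add(_make_smarts(center_smarts_list[0], center_smarts_list[2], center_smarts_list[1]))
--
--     elif symmetry_class == "121":
--         smarts_list.add(_make_smarts(center_smarts_list[0], center_smarts_list[1], center_smarts_list[2]))
--         smarts_list.add(_make_smarts(center_smarts_list[2], center_smarts_list[1], center_smarts_list[0]))
--
--     else:
--         raise AssertionError("I forgot one: %r" % (symmetry_class,))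
--
--     return list(smarts_list)
-- ===== SOURCE B (Python) =====
-- # B: instead of seven hand-written branches listing each permuted call, derive the
-- # allowed arrangements as the permutations of range(n) that preserve the symmetry-class
-- # string (sc[p[i]] == sc[i]), generated recursively in lexicographic order, and renumber
-- # each fragment with a single character scan instead of chained str.replace calls.
--
-- _invert_order_table = {
--     None: None,
--     "1": None,
--     "12": None,
--     "21": (1, 0),
--     "123": None,
--     "132": (0, 2, 1),
--     "213": (1, 0, 2),
--     "231": (2, 0, 1),
--     "312": (1, 2, 0),
--     "321": (2, 1, 0),
-- }
--
-- _KNOWN_CLASSES = ("1", "12", "123", "11", "111", "112", "122", "121")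
--
--
-- def _perms(pool):
--     # all permutations of pool, lexicographic when pool is sorted
--     if not pool:
--         return [[]]
--     res = []
--     for k in range(len(pool)):
--         rest = pool[:k] + pool[k + 1:]
--         for tail in _perms(rest):
--             res.append([pool[k]] + tail)
--     return res
--
--
-- def _make_smarts(parts):
--     # fragment i (1-based slot i+1): retag every ':d' with d a slot digit other than
--     # its own to ':i+1', in one left-to-right scan
--     n = len(parts)
--     digits = "123456789"[:n]
--     out = []
--     for i, s in enumerate(parts):
--         me = digits[i]
--         chars = []
--         j = 0
--         while j < len(s):
--             c = s[j]
--             if c == ":" and j + 1 < len(s):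
--                 d = s[j + 1]
--                 if d in digits and d != me:
--                     chars.append(":")
--                     chars.append(me)
--                     j += 2
--                     continue
--             chars.append(c)
--             j += 1
--         out.append("".join(chars))
--     return ".".join(out)
--
--
-- def compute_possible_smarts_environments(center_smarts_list, symmetry_class, reorder=None):
--     invert_order = _invert_order_table[reorder]
--     if invert_order is not None:
--         center_smarts_list = [center_smarts_list[i] for i in invert_order]
--
--     if symmetry_class not in _KNOWN_CLASSES:
--         raise AssertionError("I forgot one: %r" % (symmetry_class,))
--
--     if symmetry_class in ("1", "12", "123"):
--         arrangements = [list(center_smarts_list)]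
--     else:
--         n = len(symmetry_class)
--         arrangements = [
--             [center_smarts_list[p[i]] for i in range(n)]
--             for p in _perms(list(range(n)))
--             if all(symmetry_class[p[i]] == symmetry_class[i] for i in range(n))
--         ]
--
--     smarts_list = set()
--     for parts in arrangements:
--         smarts_list.add(_make_smarts(parts))
--     return list(smarts_list)
-- ===== Notes on version B (the rewrite author's own statement) =====
-- stated objective: alternative
-- what changed: Instead of seven hand-written if/elif branches each spelling out every permuted _make_smarts call (with a three-way hand-specialised _make_smarts), B computes the allowed arrangements as the recursively generated permutations of range(n) filtered by preserving the symmetry-class string, and renumbers each fragment in one character scan instead of chained str.replace calls.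
import Mathlib
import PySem

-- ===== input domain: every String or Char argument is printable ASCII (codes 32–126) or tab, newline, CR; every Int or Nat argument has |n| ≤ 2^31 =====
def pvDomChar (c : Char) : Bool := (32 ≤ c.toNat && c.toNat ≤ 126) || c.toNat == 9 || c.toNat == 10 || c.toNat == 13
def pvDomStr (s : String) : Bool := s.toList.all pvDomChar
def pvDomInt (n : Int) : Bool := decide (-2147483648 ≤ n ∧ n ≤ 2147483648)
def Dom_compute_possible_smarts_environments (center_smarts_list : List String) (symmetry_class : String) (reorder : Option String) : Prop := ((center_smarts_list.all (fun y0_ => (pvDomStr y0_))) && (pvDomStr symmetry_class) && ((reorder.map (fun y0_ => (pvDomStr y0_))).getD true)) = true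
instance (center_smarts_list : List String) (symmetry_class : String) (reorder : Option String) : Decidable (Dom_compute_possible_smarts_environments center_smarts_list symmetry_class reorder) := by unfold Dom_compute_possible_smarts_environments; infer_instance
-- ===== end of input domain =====

-- B derives the allowed arrangements as the permutations of range(n) that preserve the
-- symmetry-class string (generated recursively, then filtered), instead of A's seven
-- hand-written branches, and renumbers fragments with one character scan instead of
-- chained str.replace calls; same return value.
-- Python returns list(set(...)): the RETURN ORDER is the interpreter's hash order, compared
-- as a finite set; the ports keep the (equal) insertion order of the PySem.Set.

-- ===== PORT A =====
-- the module constant _invert_order_table: none = key absent (KeyError), some none = value None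
def pvInvertOrderTable (reorder : Option String) : Option (Option (List Int)) :=
  match reorder with
  | none => some none
  | some r =>
    if r = "1" then some none
    else if r = "12" then some none
    else if r = "21" then some (some [1, 0])
    else if r = "123" then some none
    else if r = "132" then some (some [0, 2, 1])
    else if r = "213" then some (some [1, 0, 2])
    else if r = "231" then some (some [2, 0, 1])
    else if r = "312" then some (some [1, 2, 0])
    else if r = "321" then some (some [2, 1, 0])
    else none

-- [center_smarts_list[i] for i in perm]  (indices are in range under Pre_; getD "" is junk outside)
def pvPermute (l : List String) (perm : List Int) : List String :=
  perm.map (fun i => (PySem.List.pyGet? l i).getD "")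

-- A's _make_smarts: three hand-written cases (N=1,2,3); other arities raise AssertionError (outside Pre_)
def pvMakeSmartsA (l : List String) : String :=
  match l with
  | [a] => a
  | [a, b] => PySem.Str.replace a ":2" ":1" ++ "." ++ PySem.Str.replace b ":1" ":2"
  | [a, b, c] =>
      PySem.Str.replace (PySem.Str.replace a ":2" ":1") ":3" ":1" ++ "." ++
      PySem.Str.replace (PySem.Str.replace b ":1" ":2") ":3" ":2" ++ "." ++
      PySem.Str.replace (PySem.Str.replace c ":1" ":3") ":2" ":3"
  | _ => ""

def compute_possible_smarts_environments (center_smarts_list : List String) (symmetry_class : String) (reorder : Option String) : List String :=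
  match pvInvertOrderTable reorder with
  | none => []  -- KeyError (outside Pre_)
  | some invert_order =>
    let l := match invert_order with
      | none => center_smarts_list
      | some perm => pvPermute center_smarts_list perm
    let g := fun (i : Int) => (PySem.List.pyGet? l i).getD ""
    let s : PySem.Set String := PySem.Set.empty
    if symmetry_class = "1" ∨ symmetry_class = "12" ∨ symmetry_class = "123" then
      s.add (pvMakeSmartsA l)
    else if symmetry_class = "11" then
      (s.add (pvMakeSmartsA [g 0, g 1])).add (pvMakeSmartsA [g 1, g 0])
    else if symmetry_class = "111" then
      (((((s.add (pvMakeSmartsA [g 0, g 1, g 2])).add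
          (pvMakeSmartsA [g 0, g 2, g 1])).add
          (pvMakeSmartsA [g 1, g 0, g 2])).add
          (pvMakeSmartsA [g 1, g 2, g 0])).add
          (pvMakeSmartsA [g 2, g 0, g 1])).add
          (pvMakeSmartsA [g 2, g 1, g 0])
    else if symmetry_class = "112" then
      (s.add (pvMakeSmartsA [g 0, g 1, g 2])).add (pvMakeSmartsA [g 1, g 0, g 2])
    else if symmetry_class = "122" then
      (s.add (pvMakeSmartsA [g 0, g 1, g 2])).add (pvMakeSmartsA [g 0, g 2, g 1])
    else if symmetry_class = "121" then
      (s.add (pvMakeSmartsA [g 0, g 1, g 2])).add (pvMakeSmartsA [g 2, g 1, g 0])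
    else []  -- AssertionError "I forgot one" (outside Pre_)

-- ===== PORT B =====
-- B's recursive permutation generator _perms (lexicographic for a sorted pool);
-- the fuel parameter only makes the Python recursion structural (unreachable for
-- fuel ≥ pool.length, and pvPerms supplies fuel = pool length)
def pvPermsGo : Nat → List Int → List (List Int)
  | _, [] => [[]]
  | 0, _ :: _ => []
  | fuel + 1, pool =>
      (List.range pool.length).foldl (fun res k =>
        res ++ (pvPermsGo fuel (pool.take k ++ pool.drop (k + 1))).map
          (fun tail => ((PySem.List.pyGet? pool (k : Int)).getD 0) :: tail)) []

def pvPerms (n : Nat) : List (List Int) := pvPermsGo n (PySem.List.pyRange 0 (n : Int))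

-- B's retagging scan: one left-to-right pass replacing ':d' (d a slot digit ≠ me) by ':me'
def pvRetag (digits : List Char) (me : Char) : List Char → List Char
  | [] => []
  | [c] => [c]
  | c :: d :: rest' =>
    if c = ':' ∧ d ∈ digits ∧ d ≠ me then ':' :: me :: pvRetag digits me rest'
    else c :: pvRetag digits me (d :: rest')

-- B's generic _make_smarts: retag each fragment for its slot, join with '.'
def pvMakeSmartsB (parts : List String) : String :=
  let digits : List Char := List.take parts.length "123456789".toList
  PySem.Str.join "." ((PySem.List.enumerate parts).map (fun is =>
    String.ofList (pvRetag digits (digits.getD is.1.toNat ' ') is.2.toList)))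

-- the permutations of range(len(sc)) preserving the class string, in _perms order
def pvClassPerms (sc : String) : List (List Int) :=
  (pvPerms (PySem.Str.len sc).toNat).filter (fun p =>
    (PySem.List.pyRange 0 (PySem.Str.len sc : Int)).all (fun i =>
      PySem.Str.pyGet? sc ((PySem.List.pyGet? p i).getD 0) == PySem.Str.pyGet? sc i))

def compute_possible_smarts_environments_alt (center_smarts_list : List String) (symmetry_class : String) (reorder : Option String) : List String :=
  match pvInvertOrderTable reorder with
  | none => []  -- KeyError (outside Pre_)
  | some invert_order =>
    let l := match invert_order with
      | none => center_smarts_list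
      | some perm => pvPermute center_smarts_list perm
    if symmetry_class ∈ ["1", "12", "123", "11", "111", "112", "122", "121"] then
      let arrangements : List (List String) :=
        if symmetry_class = "1" ∨ symmetry_class = "12" ∨ symmetry_class = "123" then [l]
        else
          (pvClassPerms symmetry_class).map (fun p =>
            (PySem.List.pyRange 0 (PySem.Str.len symmetry_class : Int)).map (fun i =>
              (PySem.List.pyGet? l ((PySem.List.pyGet? p i).getD 0)).getD ""))
      arrangements.foldl (fun s parts => PySem.Set.add s (pvMakeSmartsB parts)) PySem.Set.empty
    else []  -- AssertionError "I forgot one" (outside Pre_)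

-- ===== PRECONDITION & SPEC =====
-- Pre_ excludes exactly the inputs where the Python raises: a reorder key missing from
-- _invert_order_table (KeyError), an unknown symmetry class (AssertionError), a list too
-- short for the reorder permutation or the class's indices (IndexError), and an identity
-- class whose (reordered) list length is not 1..3 (_make_smarts AssertionError).
def Pre_compute_possible_smarts_environments (center_smarts_list : List String) (symmetry_class : String) (reorder : Option String) : Prop :=
  let L := center_smarts_list.length
  let swap2 := reorder = some "21"
  let perm3 := reorder = some "132" ∨ reorder = some "213" ∨ reorder = some "231" ∨
               reorder = some "312" ∨ reorder = some "321"
  let L' := if swap2 then 2 else if perm3 then 3 else L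
  (reorder = none ∨ reorder = some "1" ∨ reorder = some "12" ∨ reorder = some "123" ∨
   swap2 ∨ perm3) ∧
  (swap2 → 2 ≤ L) ∧ (perm3 → 3 ≤ L) ∧
  (if symmetry_class = "1" ∨ symmetry_class = "12" ∨ symmetry_class = "123" then
     1 ≤ L' ∧ L' ≤ 3
   else if symmetry_class = "11" then 2 ≤ L'
   else (symmetry_class = "111" ∨ symmetry_class = "112" ∨ symmetry_class = "122" ∨
         symmetry_class = "121") ∧ 3 ≤ L')

instance (center_smarts_list : List String) (symmetry_class : String) (reorder : Option String) : Decidable (Pre_compute_possible_smarts_environments center_smarts_list symmetry_class reorder) := by unfold Pre_compute_possible_smarts_environments; infer_instance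

def pvWitness_compute_possible_smarts_environments : List String × String × Option String :=
  (["[*:1]C", "[*:2]N"], "11", none)

def Spec_compute_possible_smarts_environments (center_smarts_list : List String) (symmetry_class : String) (reorder : Option String) (out : List String) : Prop := out = compute_possible_smarts_environments_alt center_smarts_list symmetry_class reorder
instance (center_smarts_list : List String) (symmetry_class : String) (reorder : Option String) (out : List String) : Decidable (Spec_compute_possible_smarts_environments center_smarts_list symmetry_class reorder out) := by unfold Spec_compute_possible_smarts_environments; infer_instance

-- ===== CLAIM (what is proved, stated in full; the proofs are below) =====
def Claim_equal_compute_possible_smarts_environments : Prop := ∀ (center_smarts_list : List String) (symmetry_class : String) (reorder : Option String), Dom_compute_possible_smarts_environments center_smarts_list symmetry_class reorder → Pre_compute_possible_smarts_environments center_smarts_list symmetry_class reorder → Spec_compute_possible_smarts_environments center_smarts_list symmetry_class reorder (compute_possible_smarts_environments center_smarts_list symmetry_class reorder)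

-- ===== LEMMAS AND PROOFS =====

def replSimple (d m : Char) : List Char → List Char
  | [] => []
  | [c] => [c]
  | c :: d' :: rest' =>
    if c = ':' ∧ d' = d then ':' :: m :: replSimple d m rest'
    else c :: replSimple d m (d' :: rest')

theorem replace_go_eq (d m : Char) : ∀ (fuel : Nat) (l acc : List Char), l.length ≤ fuel →
    PySem.Chars.replace.go [':', d] [':', m] fuel l acc = acc.reverse ++ replSimple d m l := by
  intro fuel
  induction fuel with
  | zero =>
    intro l acc h
    have : l = [] := List.eq_nil_of_length_eq_zero (Nat.le_zero.mp h)
    subst this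
    simp [PySem.Chars.replace.go, replSimple]
  | succ n ih =>
    intro l acc h
    match l with
    | [] => simp [PySem.Chars.replace.go, replSimple]
    | [c] =>
      have hpre : ([':', d].isPrefixOf [c]) = false := by
        simp [List.isPrefixOf]
      simp only [PySem.Chars.replace.go, hpre, Bool.false_eq_true, if_false]
      rw [ih [] (c :: acc) (by simp)]
      simp [replSimple]
    | c :: d' :: t' =>
      by_cases hc : c = ':' ∧ d' = d
      · have hpre : ([':', d].isPrefixOf (c :: d' :: t')) = true := by
          simp [List.isPrefixOf, hc.1, hc.2]
        simp only [PySem.Chars.replace.go, hpre, if_true, List.length_cons, List.drop_succ_cons,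
          List.drop_zero, List.length_nil]
        rw [ih t' _ (by simp at h; omega)]
        simp [replSimple, hc]
      · have hpre : ([':', d].isPrefixOf (c :: d' :: t')) = false := by
          simp [List.isPrefixOf]
          intro h1 h2
          exact absurd ⟨h1.symm, h2.symm⟩ hc
        simp only [PySem.Chars.replace.go, hpre, Bool.false_eq_true, if_false]
        rw [ih (d' :: t') (c :: acc) (by simp at h ⊢; omega)]
        simp [replSimple, hc]

theorem replace_eq_replSimple (s : List Char) (d m : Char) :
    PySem.Chars.replace s [':', d] [':', m] = replSimple d m s := by
  rw [PySem.Chars.replace]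
  simp only [List.isEmpty]
  rw [replace_go_eq d m s.length s [] le_rfl]
  simp

theorem repl_head? (d m c : Char) (t : List Char) :
    (replSimple d m (c :: t)).head? = some c := by
  match t with
  | [] => rfl
  | d' :: t' =>
    by_cases hc : c = ':' ∧ d' = d
    · simp [replSimple, hc, hc.1]
    · simp [replSimple, hc]

theorem repl_cons_ne (d m c : Char) (t : List Char) (hc : c ≠ ':') :
    replSimple d m (c :: t) = c :: replSimple d m t := by
  match t with
  | [] => simp [replSimple]
  | d' :: t' =>
    simp only [replSimple]
    rw [if_neg (fun h => hc h.1)]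

theorem repl_colon_head (d m : Char) (l : List Char) (hl : ∀ x, l.head? = some x → x ≠ d) :
    replSimple d m (':' :: l) = ':' :: replSimple d m l := by
  match l with
  | [] => rfl
  | x :: xs =>
    simp only [replSimple]
    rw [if_neg (fun h => hl x rfl h.2)]

theorem retag_id (digits : List Char) (me : Char) (h : ∀ d, ¬ (d ∈ digits ∧ d ≠ me)) :
    ∀ s, pvRetag digits me s = s := by
  intro s
  fun_induction pvRetag digits me s with
  | case1 => rfl
  | case2 c => rfl
  | case3 c d rest' hcond ih => exact absurd ⟨hcond.2.1, hcond.2.2⟩ (h d)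
  | case4 c d rest' hcond ih => simp [ih]

theorem retag_one (digits : List Char) (me d1 : Char)
    (h : ∀ d, (d ∈ digits ∧ d ≠ me) ↔ d = d1) :
    ∀ s, pvRetag digits me s = replSimple d1 me s := by
  intro s
  fun_induction pvRetag digits me s with
  | case1 => rfl
  | case2 c => rfl
  | case3 c d rest' hcond ih =>
    have hd : d = d1 := (h d).mp ⟨hcond.2.1, hcond.2.2⟩
    simp [replSimple, hcond.1, hd, ih]
  | case4 c d rest' hcond ih =>
    by_cases hcol : c = ':'
    · have hd : d ≠ d1 := fun hdd => hcond ⟨hcol, (h d).mpr hdd⟩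
      subst hcol
      rw [repl_colon_head d1 me _ (by simpa using hd), ih]
    · rw [repl_cons_ne d1 me c _ hcol, ih]

theorem retag_two (digits : List Char) (me d1 d2 : Char)
    (h : ∀ d, (d ∈ digits ∧ d ≠ me) ↔ (d = d1 ∨ d = d2))
    (h1 : d1 ≠ ':') (h2 : d2 ≠ ':') (hm : me ≠ ':') (h12 : d1 ≠ d2) :
    ∀ s, pvRetag digits me s = replSimple d2 me (replSimple d1 me s) := by
  have hm1 : d1 ≠ me := ((h d1).mpr (Or.inl rfl)).2
  have hm2 : d2 ≠ me := ((h d2).mpr (Or.inr rfl)).2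
  intro s
  fun_induction pvRetag digits me s with
  | case1 => rfl
  | case2 c => rfl
  | case3 c d rest' hcond ih =>
    have hd : d = d1 ∨ d = d2 := (h d).mp ⟨hcond.2.1, hcond.2.2⟩
    obtain ⟨hcol, -, -⟩ := hcond
    subst hcol
    rcases hd with h' | h'
    · subst h'
      rw [show replSimple d me (':' :: d :: rest') = ':' :: me :: replSimple d me rest' from by
        simp [replSimple]]
      rw [repl_colon_head d2 me _ (by simpa using fun hh : me = d2 => hm2 hh.symm), ih]
      rw [repl_cons_ne d2 me me _ hm]
    · subst h'
      rw [repl_colon_head d1 me _ (by simpa using fun hh : d = d1 => h12 hh.symm), ih,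
        repl_cons_ne d1 me d _ h2]
      simp [replSimple]
  | case4 c d rest' hcond ih =>
    by_cases hcol : c = ':'
    · subst hcol
      have hd : ¬ (d ∈ digits ∧ d ≠ me) := fun hdd => hcond ⟨rfl, hdd⟩
      have hd1 : d ≠ d1 := fun hh => hd ((h d).mpr (Or.inl hh))
      have hd2 : d ≠ d2 := fun hh => hd ((h d).mpr (Or.inr hh))
      rw [repl_colon_head d1 me _ (by simpa using hd1), ih,
        repl_colon_head d2 me _ (by simp [repl_head?]; exact hd2)]
    · rw [repl_cons_ne d1 me c _ hcol, ih, repl_cons_ne d2 me c _ hcol]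

theorem iff12_1 : ∀ d, (d ∈ ['1','2'] ∧ d ≠ '1') ↔ d = '2' := by
  intro d
  constructor
  · rintro ⟨hm, hne⟩
    simp at hm
    rcases hm with rfl | rfl
    · exact absurd rfl hne
    · rfl
  · rintro rfl
    exact ⟨by simp, by decide⟩

theorem iff12_2 : ∀ d, (d ∈ ['1','2'] ∧ d ≠ '2') ↔ d = '1' := by
  intro d
  constructor
  · rintro ⟨hm, hne⟩
    simp at hm
    rcases hm with rfl | rfl
    · rfl
    · exact absurd rfl hne
  · rintro rfl
    exact ⟨by simp, by decide⟩

theorem makeSmartsB_one (a : String) : pvMakeSmartsB [a] = pvMakeSmartsA [a] := by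
  simp [pvMakeSmartsB, pvMakeSmartsA, PySem.List.enumerate,
    retag_id ['1'] '1' (by intro d; rintro ⟨hm, hne⟩; simp at hm; exact hne hm),
    PySem.Str.join, PySem.Chars.join_singleton]

theorem makeSmartsB_two (a b : String) : pvMakeSmartsB [a, b] = pvMakeSmartsA [a, b] := by
  simp only [pvMakeSmartsB, pvMakeSmartsA, PySem.List.enumerate]
  simp [retag_one ['1','2'] '1' '2' iff12_1, retag_one ['1','2'] '2' '1' iff12_2,
    ← replace_eq_replSimple]
  apply String.toList_injective
  simp [PySem.Str.join, PySem.Chars.join_cons_cons, PySem.Chars.join_singleton,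
    PySem.Str.toList_replace]

theorem iff123_1 : ∀ d, (d ∈ ['1','2','3'] ∧ d ≠ '1') ↔ (d = '2' ∨ d = '3') := by
  intro d
  constructor
  · rintro ⟨hm, hne⟩
    simp at hm
    rcases hm with rfl | rfl | rfl
    · exact absurd rfl hne
    · exact Or.inl rfl
    · exact Or.inr rfl
  · rintro (rfl | rfl) <;> exact ⟨by simp, by decide⟩

theorem iff123_2 : ∀ d, (d ∈ ['1','2','3'] ∧ d ≠ '2') ↔ (d = '1' ∨ d = '3') := by
  intro d
  constructor
  · rintro ⟨hm, hne⟩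
    simp at hm
    rcases hm with rfl | rfl | rfl
    · exact Or.inl rfl
    · exact absurd rfl hne
    · exact Or.inr rfl
  · rintro (rfl | rfl) <;> exact ⟨by simp, by decide⟩

theorem iff123_3 : ∀ d, (d ∈ ['1','2','3'] ∧ d ≠ '3') ↔ (d = '1' ∨ d = '2') := by
  intro d
  constructor
  · rintro ⟨hm, hne⟩
    simp at hm
    rcases hm with rfl | rfl | rfl
    · exact Or.inl rfl
    · exact Or.inr rfl
    · exact absurd rfl hne
  · rintro (rfl | rfl) <;> exact ⟨by simp, by decide⟩

theorem makeSmartsB_three (a b c : String) : pvMakeSmartsB [a, b, c] = pvMakeSmartsA [a, b, c] := by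
  simp only [pvMakeSmartsB, pvMakeSmartsA, PySem.List.enumerate]
  simp [retag_two ['1','2','3'] '1' '2' '3' iff123_1 (by decide) (by decide) (by decide) (by decide),
    retag_two ['1','2','3'] '2' '1' '3' iff123_2 (by decide) (by decide) (by decide) (by decide),
    retag_two ['1','2','3'] '3' '1' '2' iff123_3 (by decide) (by decide) (by decide) (by decide),
    ← replace_eq_replSimple]
  apply String.toList_injective
  simp [PySem.Str.join, PySem.Chars.join_cons_cons, PySem.Chars.join_singleton,
    PySem.Str.toList_replace]

-- the post-invert stage: with reorder = None both ports reduce to their symmetry-class branch on l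
theorem pv_core (l : List String) (sc : String)
    (h : if sc = "1" ∨ sc = "12" ∨ sc = "123" then 1 ≤ l.length ∧ l.length ≤ 3
         else if sc = "11" then 2 ≤ l.length
         else (sc = "111" ∨ sc = "112" ∨ sc = "122" ∨ sc = "121") ∧ 3 ≤ l.length) :
    compute_possible_smarts_environments l sc none = compute_possible_smarts_environments_alt l sc none := by
  by_cases h1 : sc = "1" ∨ sc = "12" ∨ sc = "123"
  · simp only [if_pos h1] at h
    have hmem : sc ∈ ["1", "12", "123", "11", "111", "112", "122", "121"] := by
      rcases h1 with rfl | rfl | rfl <;> simp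
    match l, h with
    | [a], _ =>
      simp [compute_possible_smarts_environments, compute_possible_smarts_environments_alt,
        pvInvertOrderTable, h1, hmem, makeSmartsB_one]
    | [a, b], _ =>
      simp [compute_possible_smarts_environments, compute_possible_smarts_environments_alt,
        pvInvertOrderTable, h1, hmem, makeSmartsB_two]
    | [a, b, c], _ =>
      simp [compute_possible_smarts_environments, compute_possible_smarts_environments_alt,
        pvInvertOrderTable, h1, hmem, makeSmartsB_three]
  · simp only [if_neg h1] at h
    by_cases h2 : sc = "11"
    · simp only [if_pos h2] at h
      subst h2
      match l, h with
      | a :: b :: rest, _ =>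
        simp [compute_possible_smarts_environments, compute_possible_smarts_environments_alt,
          pvInvertOrderTable, PySem.List.pyGet?, PySem.List.pyIdx?, makeSmartsB_two,
          show pvClassPerms "11" = [[0, 1], [1, 0]] from by decide,
          show PySem.List.pyRange 0 2 = [0, 1] from by decide,
          show ∀ L : List String, (0 : Int) ≤ (L.length : Int) + 1 from fun L => by positivity,
          show ∀ L : List String, (1 : Int) ≤ (L.length : Int) + 1 from fun L => by omega,
          show ∀ L : List String, (0 : Int) ≤ (L.length : Int) + 2 from fun L => by positivity,
          show ∀ L : List String, (1 : Int) ≤ (L.length : Int) + 2 from fun L => by omega,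
          show ∀ L : List String, (2 : Int) ≤ (L.length : Int) + 2 from fun L => by omega,
          show ∀ L : List String, (2 : Int) ≤ (L.length : Int) + 3 from fun L => by omega]
    · simp only [if_neg h2] at h
      obtain ⟨hc, hlen⟩ := h
      match l, hlen with
      | a :: b :: c :: rest, _ =>
        rcases hc with rfl | rfl | rfl | rfl
        · simp [compute_possible_smarts_environments, compute_possible_smarts_environments_alt,
            pvInvertOrderTable, PySem.List.pyGet?, PySem.List.pyIdx?, makeSmartsB_three,
            show pvClassPerms "111" = [[0,1,2],[0,2,1],[1,0,2],[1,2,0],[2,0,1],[2,1,0]] from by decide,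
            show PySem.List.pyRange 0 3 = [0, 1, 2] from by decide,
            show ∀ L : List String, (0 : Int) ≤ (L.length : Int) + 1 from fun L => by positivity,
            show ∀ L : List String, (1 : Int) ≤ (L.length : Int) + 1 from fun L => by omega,
            show ∀ L : List String, (0 : Int) ≤ (L.length : Int) + 2 from fun L => by positivity,
            show ∀ L : List String, (1 : Int) ≤ (L.length : Int) + 2 from fun L => by omega,
            show ∀ L : List String, (2 : Int) ≤ (L.length : Int) + 2 from fun L => by omega,
            show ∀ L : List String, (2 : Int) ≤ (L.length : Int) + 3 from fun L => by omega]
        · simp [compute_possible_smarts_environments, compute_possible_smarts_environments_alt,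
            pvInvertOrderTable, PySem.List.pyGet?, PySem.List.pyIdx?, makeSmartsB_three,
            show pvClassPerms "112" = [[0,1,2],[1,0,2]] from by decide,
            show PySem.List.pyRange 0 3 = [0, 1, 2] from by decide,
            show ∀ L : List String, (0 : Int) ≤ (L.length : Int) + 1 from fun L => by positivity,
            show ∀ L : List String, (1 : Int) ≤ (L.length : Int) + 1 from fun L => by omega,
            show ∀ L : List String, (0 : Int) ≤ (L.length : Int) + 2 from fun L => by positivity,
            show ∀ L : List String, (1 : Int) ≤ (L.length : Int) + 2 from fun L => by omega,
            show ∀ L : List String, (2 : Int) ≤ (L.length : Int) + 2 from fun L => by omega,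
            show ∀ L : List String, (2 : Int) ≤ (L.length : Int) + 3 from fun L => by omega]
        · simp [compute_possible_smarts_environments, compute_possible_smarts_environments_alt,
            pvInvertOrderTable, PySem.List.pyGet?, PySem.List.pyIdx?, makeSmartsB_three,
            show pvClassPerms "122" = [[0,1,2],[0,2,1]] from by decide,
            show PySem.List.pyRange 0 3 = [0, 1, 2] from by decide,
            show ∀ L : List String, (0 : Int) ≤ (L.length : Int) + 1 from fun L => by positivity,
            show ∀ L : List String, (1 : Int) ≤ (L.length : Int) + 1 from fun L => by omega,
            show ∀ L : List String, (0 : Int) ≤ (L.length : Int) + 2 from fun L => by positivity,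
            show ∀ L : List String, (1 : Int) ≤ (L.length : Int) + 2 from fun L => by omega,
            show ∀ L : List String, (2 : Int) ≤ (L.length : Int) + 2 from fun L => by omega,
            show ∀ L : List String, (2 : Int) ≤ (L.length : Int) + 3 from fun L => by omega]
        · simp [compute_possible_smarts_environments, compute_possible_smarts_environments_alt,
            pvInvertOrderTable, PySem.List.pyGet?, PySem.List.pyIdx?, makeSmartsB_three,
            show pvClassPerms "121" = [[0,1,2],[2,1,0]] from by decide,
            show PySem.List.pyRange 0 3 = [0, 1, 2] from by decide,
            show ∀ L : List String, (0 : Int) ≤ (L.length : Int) + 1 from fun L => by positivity,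
            show ∀ L : List String, (1 : Int) ≤ (L.length : Int) + 1 from fun L => by omega,
            show ∀ L : List String, (0 : Int) ≤ (L.length : Int) + 2 from fun L => by positivity,
            show ∀ L : List String, (1 : Int) ≤ (L.length : Int) + 2 from fun L => by omega,
            show ∀ L : List String, (2 : Int) ≤ (L.length : Int) + 2 from fun L => by omega,
            show ∀ L : List String, (2 : Int) ≤ (L.length : Int) + 3 from fun L => by omega]

theorem pv_main_id (csl : List String) (sc : String) (ro : Option String)
    (hro : pvInvertOrderTable ro = some none)
    (h : if sc = "1" ∨ sc = "12" ∨ sc = "123" then 1 ≤ csl.length ∧ csl.length ≤ 3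
         else if sc = "11" then 2 ≤ csl.length
         else (sc = "111" ∨ sc = "112" ∨ sc = "122" ∨ sc = "121") ∧ 3 ≤ csl.length) :
    compute_possible_smarts_environments csl sc ro = compute_possible_smarts_environments_alt csl sc ro := by
  have hc := pv_core csl sc h
  simp only [compute_possible_smarts_environments, compute_possible_smarts_environments_alt] at hc ⊢
  rw [hro]
  exact hc

theorem pv_main_perm (csl : List String) (sc : String) (ro : Option String) (perm : List Int)
    (hro : pvInvertOrderTable ro = some (some perm))
    (h : if sc = "1" ∨ sc = "12" ∨ sc = "123" then
           1 ≤ (pvPermute csl perm).length ∧ (pvPermute csl perm).length ≤ 3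
         else if sc = "11" then 2 ≤ (pvPermute csl perm).length
         else (sc = "111" ∨ sc = "112" ∨ sc = "122" ∨ sc = "121") ∧
              3 ≤ (pvPermute csl perm).length) :
    compute_possible_smarts_environments csl sc ro = compute_possible_smarts_environments_alt csl sc ro := by
  have hc := pv_core (pvPermute csl perm) sc h
  simp only [compute_possible_smarts_environments, compute_possible_smarts_environments_alt] at hc ⊢
  rw [hro]
  exact hc

-- ===== VERDICT (by name: the statement is the Claim_ definition above) =====
theorem compute_possible_smarts_environments_spec : Claim_equal_compute_possible_smarts_environments := by
  intro csl sc ro _hdom hpre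
  unfold Pre_compute_possible_smarts_environments at hpre
  unfold Spec_compute_possible_smarts_environments
  obtain ⟨hro, _hswap, _hperm3, hcls⟩ := hpre
  rcases hro with h | h | h | h | h | h
  · subst h; exact pv_main_id csl sc none rfl (by simpa using hcls)
  · subst h; exact pv_main_id csl sc _ rfl (by simpa using hcls)
  · subst h; exact pv_main_id csl sc _ rfl (by simpa using hcls)
  · subst h; exact pv_main_id csl sc _ rfl (by simpa using hcls)
  · subst h; exact pv_main_perm csl sc _ [1, 0] rfl (by simpa [pvPermute] using hcls)
  · rcases h with h | h | h | h | h <;>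
      · subst h
        first
        | exact pv_main_perm csl sc _ [0, 2, 1] rfl (by simpa [pvPermute] using hcls)
        | exact pv_main_perm csl sc _ [1, 0, 2] rfl (by simpa [pvPermute] using hcls)
        | exact pv_main_perm csl sc _ [2, 0, 1] rfl (by simpa [pvPermute] using hcls)
        | exact pv_main_perm csl sc _ [1, 2, 0] rfl (by simpa [pvPermute] using hcls)
        | exact pv_main_perm csl sc _ [2, 1, 0] rfl (by simpa [pvPermute] using hcls)
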